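-- pv_equiv track=rewrite | github.com/JonnyTran/MultiOmicsGraphEmbedding | moge/model/dgl/utils.py | join_metapaths
-- ===== SOURCE A (Python) =====
-- from typing import List, Tuple, Dict, Union
--
-- def join_metapaths(metapaths_A: List[Tuple[str, str, str]], metapaths_B: List[Tuple[str, str, str]]) \
--         -> Dict[str, List[Tuple[str, str, str]]]:
--     output_metapaths = {}
--
--     for metapath_b in metapaths_B:
--         for metapath_a in metapaths_A:
--             if metapath_a[-1] == metapath_b[0]:
--                 new_metapath = ".".join([metapath_a[1], metapath_b[1]])
--                 output_metapaths[new_metapath] = [metapath_a, metapath_b]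
--
--     return output_metapaths
-- ===== SOURCE B (Python) =====
-- def join_metapaths(metapaths_A, metapaths_B):
--     # Index A by its last element once, then look up each B head: O(|A|+|B|+matches).
--     index = {}
--     for a in metapaths_A:
--         index.setdefault(a[-1], []).append(a)
--     output = {}
--     for b in metapaths_B:
--         for a in index.get(b[0], []):
--             output[a[1] + "." + b[1]] = [a, b]
--     return output
-- ===== Notes on version B (the rewrite author's own statement) =====
-- stated objective: faster
-- what changed: Replaces the nested scan of A for every element of B by a one-pass dict index of A keyed by last element, then a single grouped lookup per element of B.
-- outside the precondition, e.g. on join_metapaths([()], []): A returns {}, B raises IndexError; on join_metapaths([], [()]): A returns {}, B raises IndexError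
import Mathlib
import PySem

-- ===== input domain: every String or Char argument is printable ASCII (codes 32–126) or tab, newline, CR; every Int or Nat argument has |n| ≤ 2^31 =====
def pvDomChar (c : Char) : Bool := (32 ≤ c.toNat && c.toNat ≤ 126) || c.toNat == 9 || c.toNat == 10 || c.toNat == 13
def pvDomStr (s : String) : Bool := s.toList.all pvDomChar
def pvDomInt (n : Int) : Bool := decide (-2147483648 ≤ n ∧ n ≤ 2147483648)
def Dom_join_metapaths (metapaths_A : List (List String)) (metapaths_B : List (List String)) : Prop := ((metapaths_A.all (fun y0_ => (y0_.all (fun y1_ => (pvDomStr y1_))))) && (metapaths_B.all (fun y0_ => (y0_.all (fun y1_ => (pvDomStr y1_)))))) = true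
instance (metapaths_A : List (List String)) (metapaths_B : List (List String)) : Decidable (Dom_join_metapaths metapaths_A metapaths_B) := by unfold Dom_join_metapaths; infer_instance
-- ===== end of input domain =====

-- B replaces A's nested scan (all of A re-scanned for every element of B) by a dict index of A
-- keyed by last element, built once, with one grouped lookup per element of B (objective: faster).

-- ===== PORT A =====
def join_metapaths (metapaths_A : List (List String)) (metapaths_B : List (List String)) : List (String × List (List String)) :=
  (metapaths_B.foldl (fun out b =>
      metapaths_A.foldl (fun out a =>
          if PySem.List.pyGetD a (-1) "" = PySem.List.pyGetD b 0 "" then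
            out.insert (PySem.Str.join "." [PySem.List.pyGetD a 1 "", PySem.List.pyGetD b 1 ""]) [a, b]
          else out)
        out)
    (PySem.Dict.empty : PySem.Dict String (List (List String)))).items

-- ===== PORT B =====
def join_metapaths_alt (metapaths_A : List (List String)) (metapaths_B : List (List String)) : List (String × List (List String)) :=
  let index : PySem.Dict String (List (List String)) :=
    metapaths_A.foldl (fun ix a => ix.modify (PySem.List.pyGetD a (-1) "") [] (fun g => g ++ [a]))
      PySem.Dict.empty
  (metapaths_B.foldl (fun out b =>
      (index.getD (PySem.List.pyGetD b 0 "") []).foldl (fun out a =>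
          out.insert (PySem.Str.join "." [PySem.List.pyGetD a 1 "", PySem.List.pyGetD b 1 ""]) [a, b])
        out)
    (PySem.Dict.empty : PySem.Dict String (List (List String)))).items

-- ===== PRECONDITION & SPEC =====
-- Pre_ excludes exactly the inputs on which a program raises IndexError: A raises when a metapath
-- accessed by [-1]/[0]/[1] is too short; additionally, B's up-front index build (and B-head lookup)
-- raises on an empty metapath even in the degenerate cases (B empty, or A empty) where A's nested
-- loop never reaches it and A returns {}.
def Pre_join_metapaths (metapaths_A : List (List String)) (metapaths_B : List (List String)) : Prop :=
  (∀ a ∈ metapaths_A, a ≠ []) ∧ (∀ b ∈ metapaths_B, b ≠ []) ∧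
  (∀ a ∈ metapaths_A, ∀ b ∈ metapaths_B, a.getLast? = b.head? → 2 ≤ a.length ∧ 2 ≤ b.length)
instance (metapaths_A : List (List String)) (metapaths_B : List (List String)) : Decidable (Pre_join_metapaths metapaths_A metapaths_B) := by unfold Pre_join_metapaths; infer_instance

def pvWitness_join_metapaths : List (List String) × List (List String) :=
  ([["x", "y", "c"], ["p", "q", "c"]], [["c", "z", "w"]])

def Spec_join_metapaths (metapaths_A : List (List String)) (metapaths_B : List (List String)) (out : List (String × List (List String))) : Prop := out = join_metapaths_alt metapaths_A metapaths_B
instance (metapaths_A : List (List String)) (metapaths_B : List (List String)) (out : List (String × List (List String))) : Decidable (Spec_join_metapaths metapaths_A metapaths_B out) := by unfold Spec_join_metapaths; infer_instance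

-- ===== CLAIM (what is proved, stated in full; the proofs are below) =====
def Claim_equal_join_metapaths : Prop := ∀ (metapaths_A : List (List String)) (metapaths_B : List (List String)), Dom_join_metapaths metapaths_A metapaths_B → Pre_join_metapaths metapaths_A metapaths_B → Spec_join_metapaths metapaths_A metapaths_B (join_metapaths metapaths_A metapaths_B)

-- ===== LEMMAS AND PROOFS =====

-- A fold that skips elements failing p equals the fold over the filtered list.
theorem foldl_if_filter {α β : Type} (p : α → Prop) [DecidablePred p] (f : β → α → β) :
    ∀ (xs : List α) (init : β),
      xs.foldl (fun acc x => if p x then f acc x else acc) init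
        = (xs.filter (fun x => decide (p x))).foldl f init := by
  intro xs
  induction xs with
  | nil => intro init; rfl
  | cons x xs ih =>
    intro init
    by_cases hp : p x <;> simp [hp, ih]

-- The group stored in B's index under key k is exactly the sublist of A with last element k.
theorem index_getD (mA : List (List String)) :
    ∀ (ix : PySem.Dict String (List (List String))) (k : String),
      (mA.foldl (fun ix a => ix.modify (PySem.List.pyGetD a (-1) "") [] (fun g => g ++ [a])) ix).getD k []
        = ix.getD k [] ++ mA.filter (fun a => decide (PySem.List.pyGetD a (-1) "" = k)) := by
  induction mA with
  | nil => intro ix k; simp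
  | cons a mA ih =>
    intro ix k
    simp only [List.foldl_cons, ih, List.filter_cons, PySem.Dict.getD_modify]
    by_cases h : PySem.List.pyGetD a (-1) "" = k
    · simp [h]
    · simp [h, Ne.symm h]

-- ===== VERDICT (by name: the statement is the Claim_ definition above) =====
-- ===== VERDICT (by name: the statement is the Claim_ definition above) =====
theorem join_metapaths_spec : Claim_equal_join_metapaths := by
  intro mA mB _ _
  unfold Spec_join_metapaths join_metapaths join_metapaths_alt
  congr 1
  apply List.foldl_ext
  intro out b _
  rw [foldl_if_filter (fun a => PySem.List.pyGetD a (-1) "" = PySem.List.pyGetD b 0 ""),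
    index_getD mA PySem.Dict.empty (PySem.List.pyGetD b 0 "")]
  simp [PySem.Dict.getD_empty]
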